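-- pv_equiv track=rewrite | github.com/liufly/mecrf | data_utils_ner.py | convert2SBIEO
-- ===== SOURCE A (Python) =====
-- def convert2BIO(data):
--     for document in data:
--         for sentence in document:
--             for i, (word, pos, chunk, ner) in enumerate(sentence):
--                 is_first = i == 0
--                 is_last = i == len(sentence) - 1
--                 t = ner[2:]
--                 if ner[:2] == 'I-':
--                     if is_first or sentence[i - 1][3] == 'O':
--                         sentence[i] = ((word, pos, chunk, 'B-' + ner[2:]))
--                     else:
--                         if sentence[i - 1][3][2:] != ner[2:]:
--                             sentence[i] = ((word, pos, chunk, 'B-' + ner[2:]))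
--     return data
--
-- def convert2SBIEO(data):
--     data = convert2BIO(data)
--     for document in data:
--         for sentence in document:
--             for i, (word, pos, chunk, ner) in enumerate(sentence):
--                 is_first = i == 0
--                 is_last = i == len(sentence) - 1
--                 current_tag = ner[:2]
--                 next_tag = '' if is_last else sentence[i + 1][3][:2]
--                 new_tag = None
--                 if current_tag == 'B-' and (next_tag in ['B-', 'O', '']):
--                     new_tag = 'S-' + ner[2:]
--                 elif current_tag == 'I-' and (next_tag in ['B-', 'O', '']):
--                     new_tag = 'E-' + ner[2:]
--                 else:
--                     new_tag = ner
--                 sentence[i] = ((word, pos, chunk, new_tag))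
--     return data
-- ===== SOURCE B (Python) =====
-- # Single streaming pass per sentence (one-token delay) instead of A's two index-based
-- # passes; mutates each sentence list in place and returns the same data object, like A.
--
-- def _finalize(token, next_prefix):
--     word, pos, chunk, bio = token
--     if bio[:2] == 'B-' and next_prefix in ('B-', 'O', ''):
--         return (word, pos, chunk, 'S-' + bio[2:])
--     if bio[:2] == 'I-' and next_prefix in ('B-', 'O', ''):
--         return (word, pos, chunk, 'E-' + bio[2:])
--     return token
--
-- def convert2SBIEO(data):
--     for document in data:
--         for sentence in document:
--             out = []
--             prev_tag = None   # original tag of the previous token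
--             pending = None    # previous token with its corrected BIO tag, awaiting its right neighbour
--             for (word, pos, chunk, ner) in sentence:
--                 if ner[:2] == 'I-' and (prev_tag is None or prev_tag == 'O'
--                                         or prev_tag[2:] != ner[2:]):
--                     bio = 'B-' + ner[2:]
--                 else:
--                     bio = ner
--                 if pending is not None:
--                     out.append(_finalize(pending, bio[:2]))
--                 pending = (word, pos, chunk, bio)
--                 prev_tag = ner
--             if pending is not None:
--                 out.append(_finalize(pending, ''))
--             sentence[:] = out
--     return data
-- ===== Notes on version B (the rewrite author's own statement) =====
-- stated objective: alternative
-- what changed: Replaces A's two complete index-based passes (a BIO-correction pass that re-reads sentence[i-1] and an SBIEO pass that re-reads sentence[i+1]) by one streaming pass per sentence that carries the previous original tag and a one-token pending buffer, emitting each finalized token as soon as its right neighbour's corrected tag is known.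
import Mathlib
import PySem

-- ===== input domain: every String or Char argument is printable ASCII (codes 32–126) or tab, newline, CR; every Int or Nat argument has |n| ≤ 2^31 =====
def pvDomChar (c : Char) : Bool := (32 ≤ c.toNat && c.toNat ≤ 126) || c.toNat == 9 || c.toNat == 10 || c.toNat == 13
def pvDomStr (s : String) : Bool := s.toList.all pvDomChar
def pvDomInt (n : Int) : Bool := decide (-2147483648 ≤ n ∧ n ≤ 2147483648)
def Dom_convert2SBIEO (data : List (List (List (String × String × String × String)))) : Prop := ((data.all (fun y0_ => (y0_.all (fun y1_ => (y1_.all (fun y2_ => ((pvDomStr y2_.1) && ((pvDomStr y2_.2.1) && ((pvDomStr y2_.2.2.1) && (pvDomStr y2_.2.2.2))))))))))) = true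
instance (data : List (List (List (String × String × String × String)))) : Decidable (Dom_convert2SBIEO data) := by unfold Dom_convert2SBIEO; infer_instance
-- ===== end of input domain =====

-- B replaces A's two index-based passes per sentence by one streaming pass with a
-- one-token pending buffer.  A mutates each sentence list in place and returns the same
-- object; B performs the same in-place mutation; the theorem is about the return value.

-- s[:2] and s[2:] of Python (exact for nonnegative bounds)
def pre2 (s : String) : String := String.ofList (s.toList.take 2)
def suf2 (s : String) : String := String.ofList (s.toList.drop 2)

-- ===== PORT A =====
-- one step of convert2BIO's inner loop: index i of the (mutated-so-far) sentence
def bioStep (acc : List (String × String × String × String)) (i : Nat) :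
    List (String × String × String × String) :=
  match acc[i]? with
  | none => acc
  | some (w, p, c, ner) =>
    if pre2 ner = "I-" then
      -- sentence[i-1][3], read from the mutated list, as in Python
      let prev := (acc.getD (i - 1) ("", "", "", "")).2.2.2
      if i = 0 ∨ prev = "O" then acc.set i (w, p, c, "B-" ++ suf2 ner)
      else if suf2 prev ≠ suf2 ner then acc.set i (w, p, c, "B-" ++ suf2 ner)
      else acc
    else acc

def bioSent (s : List (String × String × String × String)) :
    List (String × String × String × String) :=
  (List.range s.length).foldl bioStep s

def convert2BIO (data : List (List (List (String × String × String × String)))) :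
    List (List (List (String × String × String × String))) :=
  data.map (fun doc => doc.map bioSent)

-- one step of convert2SBIEO's inner loop
def sbieoStep (acc : List (String × String × String × String)) (i : Nat) :
    List (String × String × String × String) :=
  match acc[i]? with
  | none => acc
  | some (w, p, c, ner) =>
    let currentTag := pre2 ner
    let nextTag := if i = acc.length - 1 then ""
                   else pre2 (acc.getD (i + 1) ("", "", "", "")).2.2.2
    let newTag :=
      if currentTag = "B-" ∧ (nextTag = "B-" ∨ nextTag = "O" ∨ nextTag = "") then
        "S-" ++ suf2 ner
      else if currentTag = "I-" ∧ (nextTag = "B-" ∨ nextTag = "O" ∨ nextTag = "") then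
        "E-" ++ suf2 ner
      else ner
    acc.set i (w, p, c, newTag)

def sbieoSent (s : List (String × String × String × String)) :
    List (String × String × String × String) :=
  (List.range s.length).foldl sbieoStep s

def convert2SBIEO (data : List (List (List (String × String × String × String)))) :
    List (List (List (String × String × String × String))) :=
  (convert2BIO data).map (fun doc => doc.map sbieoSent)

-- ===== PORT B =====
-- corrected BIO tag of a token given the ORIGINAL tag of its left neighbour
def bioOf (prev : Option String) (ner : String) : String :=
  if pre2 ner = "I-" then
    match prev with
    | none => "B-" ++ suf2 ner
    | some p => if p = "O" ∨ suf2 p ≠ suf2 ner then "B-" ++ suf2 ner else ner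
  else ner

-- _finalize of Source B
def finalize (t : String × String × String × String) (np : String) :
    String × String × String × String :=
  if pre2 t.2.2.2 = "B-" ∧ (np = "B-" ∨ np = "O" ∨ np = "") then
    (t.1, t.2.1, t.2.2.1, "S-" ++ suf2 t.2.2.2)
  else if pre2 t.2.2.2 = "I-" ∧ (np = "B-" ∨ np = "O" ∨ np = "") then
    (t.1, t.2.1, t.2.2.1, "E-" ++ suf2 t.2.2.2)
  else t

-- the streaming pass: prev = previous original tag, pending = previous token (BIO-tagged)
def altLoop (prev : Option String) (pending : Option (String × String × String × String)) :
    List (String × String × String × String) → List (String × String × String × String)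
  | [] => match pending with
          | none => []
          | some t => [finalize t ""]
  | (w, p, c, ner) :: tl =>
    let bio := bioOf prev ner
    (match pending with
     | none => []
     | some t => [finalize t (pre2 bio)]) ++ altLoop (some ner) (some (w, p, c, bio)) tl

def convert2SBIEO_alt (data : List (List (List (String × String × String × String)))) :
    List (List (List (String × String × String × String))) :=
  data.map (fun doc => doc.map (altLoop none none))

-- ===== PRECONDITION & SPEC =====
def Spec_convert2SBIEO (data : List (List (List (String × String × String × String)))) (out : List (List (List (String × String × String × String)))) : Prop := out = convert2SBIEO_alt data
instance (data : List (List (List (String × String × String × String)))) (out : List (List (List (String × String × String × String)))) : Decidable (Spec_convert2SBIEO data out) := by unfold Spec_convert2SBIEO; infer_instance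

-- ===== CLAIM (what is proved, stated in full; the proofs are below) =====
def Claim_equal_convert2SBIEO : Prop := ∀ (data : List (List (List (String × String × String × String)))), Dom_convert2SBIEO data → Spec_convert2SBIEO data (convert2SBIEO data)

-- ===== LEMMAS AND PROOFS =====

-- functional description of the BIO pass (prev = original tag of the left neighbour)
def bioMap (prev : Option String) :
    List (String × String × String × String) → List (String × String × String × String)
  | [] => []
  | (w, p, c, ner) :: tl => (w, p, c, bioOf prev ner) :: bioMap (some ner) tl

-- original tag of the last token of xs (prev if xs is empty)
def origLast (prev : Option String) (xs : List (String × String × String × String)) :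
    Option String :=
  match xs.getLast? with
  | some t => some t.2.2.2
  | none => prev

-- prefix of the first tag of a list, "" if empty
def headPre : List (String × String × String × String) → String
  | [] => ""
  | t :: _ => pre2 t.2.2.2

-- functional description of the SBIEO pass (purely local: token and next tag's prefix)
def sbiMap : List (String × String × String × String) → List (String × String × String × String)
  | [] => []
  | t :: tl => finalize t (headPre tl) :: sbiMap tl

theorem bioMap_length (prev : Option String) (l : List (String × String × String × String)) :
    (bioMap prev l).length = l.length := by
  induction l generalizing prev with
  | nil => rfl
  | cons t tl ih => obtain ⟨w, p, c, ner⟩ := t; simp [bioMap, ih]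

theorem bioMap_append_singleton (prev : Option String)
    (xs : List (String × String × String × String)) (t : String × String × String × String) :
    bioMap prev (xs ++ [t]) =
      bioMap prev xs ++ [(t.1, t.2.1, t.2.2.1, bioOf (origLast prev xs) t.2.2.2)] := by
  induction xs generalizing prev with
  | nil => obtain ⟨w, p, c, ner⟩ := t; simp [bioMap, origLast]
  | cons x tl ih =>
    obtain ⟨w, p, c, ner⟩ := x
    simp only [List.cons_append, bioMap, ih (some ner)]
    have : origLast (some ner) tl = origLast prev ((w, p, c, ner) :: tl) := by
      cases tl with
      | nil => simp [origLast]
      | cons y ys =>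
        unfold origLast
        rw [List.getLast?_cons_cons]
        cases h : (y :: ys).getLast? with
        | none => simp at h
        | some z => rfl
    rw [this]

theorem set_append_cons {α : Type} (done : List α) (t x : α) (tl : List α) :
    (done ++ t :: tl).set done.length x = done ++ x :: tl := by
  induction done with
  | nil => rfl
  | cons d ds ih => simp [ih]

theorem getElem?_append_len {α : Type} (done : List α) (t : α) (tl : List α) :
    (done ++ t :: tl)[done.length]? = some t := by
  rw [List.getElem?_append_right (Nat.le_refl _)]
  simp

theorem getD_append_len_succ {α : Type} [Inhabited α] (done : List α) (t : α)
    (tl : List α) (d : α) :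
    (done ++ t :: tl).getD (done.length + 1) d = tl.getD 0 d := by
  simp only [List.getD]
  rw [List.getElem?_append_right (by omega)]
  simp

-- key string facts
theorem suf2_B (x : String) : suf2 ("B-" ++ x) = x := by
  simp [suf2, String.toList_append, String.ofList_toList]

theorem B_ne_O (x : String) : ("B-" ++ x) ≠ "O" := by
  intro h
  have := congrArg String.toList h
  simp [String.toList_append] at this

theorem I_ne_O (p : String) (h : pre2 p = "I-") : p ≠ "O" := by
  intro he; subst he; exact absurd h (by decide)

-- the mutated tag of a BIO-processed token decides the (= "O") and suf2 tests as its original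
theorem bioOf_O_iff (prev : Option String) (p : String) :
    (bioOf prev p = "O" ↔ p = "O") ∧ suf2 (bioOf prev p) = suf2 p := by
  unfold bioOf
  by_cases hI : pre2 p = "I-"
  · rw [if_pos hI]
    have hB : (("B-" ++ suf2 p = "O") ↔ p = "O") ∧ suf2 ("B-" ++ suf2 p) = suf2 p :=
      ⟨⟨fun h => absurd h (B_ne_O _), fun h => absurd h (I_ne_O p hI)⟩, suf2_B _⟩
    cases prev with
    | none => exact hB
    | some q =>
      dsimp only
      by_cases hc : q = "O" ∨ suf2 q ≠ suf2 p
      · rw [if_pos hc]; exact hB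
      · rw [if_neg hc]; exact ⟨Iff.rfl, rfl⟩
  · rw [if_neg hI]; exact ⟨Iff.rfl, rfl⟩

-- last element of bioMap, related to the original last token
theorem bioMap_getLast?_spec (prev : Option String)
    (xs : List (String × String × String × String)) (hne : xs ≠ []) :
    ∃ t b, xs.getLast? = some t ∧
      (bioMap prev xs).getLast? = some b ∧
      (b.2.2.2 = "O" ↔ t.2.2.2 = "O") ∧ suf2 b.2.2.2 = suf2 t.2.2.2 := by
  induction xs generalizing prev with
  | nil => exact absurd rfl hne
  | cons x tl ih =>
    obtain ⟨w, p, c, ner⟩ := x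
    cases tl with
    | nil =>
      refine ⟨(w, p, c, ner), (w, p, c, bioOf prev ner), rfl, rfl, ?_, ?_⟩
      · exact (bioOf_O_iff prev ner).1
      · exact (bioOf_O_iff prev ner).2
    | cons y ys =>
      obtain ⟨t, b, h1, h2, h3, h4⟩ := ih (some ner) (by simp)
      refine ⟨t, b, ?_, ?_, h3, h4⟩
      · rw [List.getLast?_cons_cons]; exact h1
      · simpa [bioMap, List.getLast?_cons_cons] using h2

-- invariant of A's BIO foldl: processed prefix ++ untouched suffix
theorem bio_foldl_inv (rest pref : List (String × String × String × String)) :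
    (List.range' pref.length rest.length).foldl bioStep (bioMap none pref ++ rest) =
      bioMap none pref ++ bioMap (origLast none pref) rest := by
  induction rest generalizing pref with
  | nil => simp [bioMap]
  | cons t tl ih =>
    obtain ⟨w, p, c, ner⟩ := t
    simp only [List.length_cons]
    rw [List.range'_succ, List.foldl_cons]
    have hlen : (bioMap none pref).length = pref.length := bioMap_length _ _
    have hstep : bioStep (bioMap none pref ++ (w, p, c, ner) :: tl) (bioMap none pref).length =
        bioMap none pref ++ (w, p, c, bioOf (origLast none pref) ner) :: tl := by
      unfold bioStep
      rw [getElem?_append_len]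
      simp only
      by_cases hI : pre2 ner = "I-"
      · rw [if_pos hI]
        by_cases hp0 : pref = []
        · subst hp0
          simp [bioMap, origLast, bioOf, hI]
        · obtain ⟨torig, b, h1, h2, h3, h4⟩ := bioMap_getLast?_spec none pref hp0
          have hlpos : 0 < (bioMap none pref).length := by
            rw [hlen]; exact List.length_pos_of_ne_nil hp0
          have hprev : (bioMap none pref ++ (w, p, c, ner) :: tl).getD
              ((bioMap none pref).length - 1) ("", "", "", "") = b := by
            simp only [List.getD]
            rw [List.getElem?_append_left (by omega)]
            have h5 := (List.getLast?_eq_getElem? (l := bioMap none pref)).symm.trans h2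
            rw [h5]
            rfl
          have hne0 : ¬ (bioMap none pref).length = 0 := by omega
          have hOL : origLast none pref = some torig.2.2.2 := by
            unfold origLast; rw [h1]
          rw [hprev]
          have hbio : bioOf (origLast none pref) ner =
              (if b.2.2.2 = "O" ∨ suf2 b.2.2.2 ≠ suf2 ner then "B-" ++ suf2 ner else ner) := by
            rw [hOL]
            unfold bioOf
            rw [if_pos hI]
            dsimp only
            have hsuf : (suf2 torig.2.2.2 ≠ suf2 ner) ↔ (suf2 b.2.2.2 ≠ suf2 ner) := by rw [h4]
            exact if_congr (or_congr h3.symm hsuf) rfl rfl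
          by_cases hO : b.2.2.2 = "O"
          · rw [if_pos (Or.inr hO), set_append_cons, hbio, if_pos (Or.inl hO)]
          · rw [if_neg (by simp only [not_or]; exact ⟨hne0, hO⟩)]
            by_cases hs : suf2 b.2.2.2 ≠ suf2 ner
            · rw [if_pos hs, set_append_cons, hbio, if_pos (Or.inr hs)]
            · rw [if_neg hs, hbio, if_neg (by simp only [not_or, not_not] at hs ⊢; exact ⟨hO, hs⟩)]
      · rw [if_neg hI]
        have : bioOf (origLast none pref) ner = ner := by unfold bioOf; rw [if_neg hI]
        rw [this]
    rw [← hlen, hstep, hlen]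
    have hre : bioMap none pref ++ (w, p, c, bioOf (origLast none pref) ner) :: tl =
        bioMap none (pref ++ [(w, p, c, ner)]) ++ tl := by
      rw [bioMap_append_singleton]; simp
    rw [hre]
    have hl2 : pref.length + 1 = (pref ++ [(w, p, c, ner)]).length := by simp
    rw [hl2, ih]
    rw [bioMap_append_singleton]
    have : origLast none (pref ++ [(w, p, c, ner)]) = some ner := by
      unfold origLast; simp
    rw [this]
    simp [origLast, bioMap]

theorem bioSent_eq (s : List (String × String × String × String)) :
    bioSent s = bioMap none s := by
  have := bio_foldl_inv s []
  simpa [bioSent, bioMap, origLast, List.range_eq_range'] using this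

-- invariant of A's SBIEO foldl (reads only indices ≥ current, so purely local)
theorem sbieo_foldl_inv (rest done : List (String × String × String × String)) :
    (List.range' done.length rest.length).foldl sbieoStep (done ++ rest) =
      done ++ sbiMap rest := by
  induction rest generalizing done with
  | nil => simp [sbiMap]
  | cons t tl ih =>
    obtain ⟨w, p, c, ner⟩ := t
    simp only [List.length_cons]
    rw [List.range'_succ, List.foldl_cons]
    have hstep : sbieoStep (done ++ (w, p, c, ner) :: tl) done.length =
        done ++ finalize (w, p, c, ner) (headPre tl) :: tl := by
      unfold sbieoStep
      rw [getElem?_append_len]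
      simp only
      have hnext : (if done.length = (done ++ (w, p, c, ner) :: tl).length - 1 then ""
          else pre2 ((done ++ (w, p, c, ner) :: tl).getD (done.length + 1)
            ("", "", "", "")).2.2.2) = headPre tl := by
        cases tl with
        | nil => simp [headPre]
        | cons y ys =>
          rw [if_neg (by simp)]
          rw [getD_append_len_succ]
          obtain ⟨a1, a2, a3, a4⟩ := y
          simp [headPre, List.getD]
      rw [hnext, set_append_cons]
      unfold finalize
      simp only
      split
      · rfl
      · split <;> rfl
    rw [hstep]
    have : done ++ finalize (w, p, c, ner) (headPre tl) :: tl =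
        (done ++ [finalize (w, p, c, ner) (headPre tl)]) ++ tl := by simp
    rw [this]
    have hl : done.length + 1 = (done ++ [finalize (w, p, c, ner) (headPre tl)]).length := by simp
    rw [hl, ih]
    simp [sbiMap]

theorem sbieoSent_eq (l : List (String × String × String × String)) :
    sbieoSent l = sbiMap l := by
  have := sbieo_foldl_inv l []
  simpa [sbieoSent, List.range_eq_range'] using this

-- B's streaming loop computes sbiMap ∘ bioMap with a one-token delay
theorem altLoop_eq (l : List (String × String × String × String)) :
    ∀ (prev : Option String) (pending : Option (String × String × String × String)),
      altLoop prev pending l =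
        (match pending with
         | none => []
         | some t => [finalize t (headPre (bioMap prev l))]) ++ sbiMap (bioMap prev l) := by
  induction l with
  | nil =>
    intro prev pending
    cases pending <;> simp [altLoop, bioMap, sbiMap, headPre]
  | cons t tl ih =>
    intro prev pending
    obtain ⟨w, p, c, ner⟩ := t
    simp only [altLoop, bioMap, sbiMap, headPre, ih (some ner)]
    cases pending <;> simp

theorem sentence_eq (s : List (String × String × String × String)) :
    sbieoSent (bioSent s) = altLoop none none s := by
  rw [bioSent_eq, sbieoSent_eq, altLoop_eq s none none]
  rfl

-- ===== VERDICT (by name: the statement is the Claim_ definition above) =====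
theorem convert2SBIEO_spec : Claim_equal_convert2SBIEO := by
  intro data _
  unfold Spec_convert2SBIEO convert2SBIEO convert2BIO convert2SBIEO_alt
  rw [List.map_map]
  apply List.map_congr_left
  intro doc _
  simp only [Function.comp, List.map_map]
  apply List.map_congr_left
  intro s _
  exact sentence_eq s
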